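-- pv_equiv track=rewrite | github.com/natemago/adventofcode2016 | day9/day9part2.py | count_size
-- ===== SOURCE A (Python) =====
-- def count_size(s):
--   l = 0
--   m = False
--   for c in s:
--     if c in ' \t\n\r':
--       continue
--     if c == '(' and not m:
--       m = True
--       continue
--     if c == ')' and m:
--       m = False
--       continue
--     if not m:
--       l += 1
--   return l
-- ===== SOURCE B (Python) =====
-- def count_size(s):
--     l = 0
--     i = 0
--     n = len(s)
--     while i < n:
--         c = s[i]
--         if c in ' \t\n\r':
--             i += 1
--         elif c == '(':
--             j = s.find(')', i)
--             if j == -1: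
--                 break
--             i = j + 1
--         else:
--             l += 1
--             i += 1
--     return l
-- ===== Notes on version B (the rewrite author's own statement) =====
-- stated objective: idiomatic
-- what changed: Replaces the for-each loop with an in-marker boolean flag by an index-based while loop that jumps past each whole parenthesized region with str.find(')'), so no flag state is carried.
import Mathlib
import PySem

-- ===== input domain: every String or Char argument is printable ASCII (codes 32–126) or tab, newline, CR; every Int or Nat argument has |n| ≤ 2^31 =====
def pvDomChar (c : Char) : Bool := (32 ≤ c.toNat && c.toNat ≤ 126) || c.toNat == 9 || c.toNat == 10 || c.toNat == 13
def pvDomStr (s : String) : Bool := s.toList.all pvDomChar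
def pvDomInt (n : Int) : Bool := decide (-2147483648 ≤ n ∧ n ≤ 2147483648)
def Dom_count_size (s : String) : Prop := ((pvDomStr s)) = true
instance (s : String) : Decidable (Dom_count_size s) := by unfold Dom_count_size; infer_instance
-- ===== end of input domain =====

-- B changes the traversal (index jump past each '(...)' region via find) instead of carrying A's boolean flag; objective: idiomatic, same cost.

-- ===== PORT A =====
-- for-each loop with accumulator l and flag m, transliterated as structural recursion
def csLoopA : List Char → Int → Bool → Int
  | [], l, _ => l
  | c :: cs, l, m =>
    if c = ' ' ∨ c = '\t' ∨ c = '\n' ∨ c = '\r' then csLoopA cs l m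
    else if c = '(' ∧ m = false then csLoopA cs l true
    else if c = ')' ∧ m = true then csLoopA cs l false
    else if m = false then csLoopA cs (l + 1) m
    else csLoopA cs l m

def count_size (s : String) : Int := csLoopA s.toList 0 false

-- ===== PORT B =====
-- s.find(')', i) followed by i = j + 1 : returns the suffix after the first ')', none = find returned -1
def csSkipClose : List Char → Option (List Char)
  | [] => none
  | c :: cs => if c = ')' then some cs else csSkipClose cs

theorem csSkipClose_length : ∀ (cs r : List Char), csSkipClose cs = some r → r.length < cs.length := by
  intro cs
  induction cs with
  | nil => intro r h; simp [csSkipClose] at h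
  | cons c cs ih =>
    intro r h
    by_cases hc : c = ')'
    · simp [csSkipClose, hc] at h; simp [← h]
    · simp [csSkipClose, hc] at h
      have := ih r h; simp; omega

-- the while loop over index i, as recursion on the remaining suffix with accumulator l
def csLoopB : List Char → Int → Int
  | [], l => l
  | c :: cs, l =>
    if c = ' ' ∨ c = '\t' ∨ c = '\n' ∨ c = '\r' then csLoopB cs l
    else if c = '(' then
      match h : csSkipClose cs with
      | none => l
      | some r => csLoopB r l
    else csLoopB cs (l + 1)
termination_by cs _ => cs.length
decreasing_by
  · simp
  · have := csSkipClose_length cs r h; simp; omega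
  · simp

def count_size_alt (s : String) : Int := csLoopB s.toList 0

-- ===== PRECONDITION & SPEC =====
def Spec_count_size (s : String) (out : Int) : Prop := out = count_size_alt s
instance (s : String) (out : Int) : Decidable (Spec_count_size s out) := by unfold Spec_count_size; infer_instance

-- ===== CLAIM (what is proved, stated in full; the proofs are below) =====
def Claim_equal_count_size : Prop := ∀ (s : String), Dom_count_size s → Spec_count_size s (count_size s)

-- ===== LEMMAS AND PROOFS =====

-- in marker mode A just scans to the first ')', exactly what csSkipClose computes
theorem csLoopA_true (cs : List Char) (l : Int) :
    csLoopA cs l true = match csSkipClose cs with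
      | none => l
      | some r => csLoopA r l false := by
  induction cs with
  | nil => simp [csLoopA, csSkipClose]
  | cons c cs ih =>
    by_cases hc : c = ')'
    · simp [csLoopA, csSkipClose, hc]
    · by_cases hw : c = ' ' ∨ c = '\t' ∨ c = '\n' ∨ c = '\r'
      · have hc' : c ≠ ')' := hc
        simp [csLoopA, csSkipClose, hw, hc']
        · exact ih
      · simp [csLoopA, csSkipClose, hw, hc]
        exact ih

theorem csLoopA_eq_csLoopB (cs : List Char) (l : Int) :
    csLoopA cs l false = csLoopB cs l := by
  induction cs, l using csLoopB.induct with
  | case1 l => simp [csLoopA, csLoopB]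
  | case2 c cs l hw ih => simp [csLoopA, csLoopB, hw, ih]
  | case3 cs l hnone hw =>
    simp [csLoopA, csLoopB, csLoopA_true, hnone]
    split <;> simp_all
  | case4 cs l r hsome hw ih =>
    simp [csLoopA, csLoopB, csLoopA_true, hsome, ih]
    split <;> simp_all
  | case5 c cs l hw hp ih =>
    have hw' : ¬(c = ' ' ∨ c = '\t' ∨ c = '\n' ∨ c = '\r') := hw
    simp [csLoopA, csLoopB, hw', hp, ih]

-- ===== VERDICT (by name: the statement is the Claim_ definition above) =====
theorem count_size_spec : Claim_equal_count_size := by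
  intro s _
  unfold Spec_count_size count_size count_size_alt
  exact csLoopA_eq_csLoopB _ _
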